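-- pv_equiv track=rewrite | github.com/erydegio/aoc | Aoc/2024/12/day_12.py | calculate_areas
-- ===== SOURCE A (Python) =====
-- def calculate_perimeter(area):
--     perimeter = 0
--     for x, y in area:
--         # Controlla i quattro lati di ogni cella
--         if (x-1, y) not in area:
--             perimeter += 1
--         if (x+1, y) not in area:
--             perimeter += 1
--         if (x, y-1) not in area:
--             perimeter += 1
--         if (x, y+1) not in area:
--             perimeter += 1
--     return perimeter
--
-- def calculate_areas(coordinate_dict):
--     areas = {}
--     for letter, groups in coordinate_dict.items():
--         acc = 0
--         for group in groups:
--             acc +=  len(group) * calculate_perimeter(group)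
--         areas[letter] = acc
--     return sum(areas.values())
-- ===== SOURCE B (Python) =====
-- def calculate_areas(coordinate_dict):
--     total = 0
--     for groups in coordinate_dict.values():
--         for group in groups:
--             cells = set(group)
--             n = len(group)
--             pairs = sum(((x + 1, y) in cells) + ((x, y + 1) in cells)
--                         for x, y in group)
--             total += n * (4 * n - 2 * pairs)
--     return total
-- ===== Notes on version B (the rewrite author's own statement) =====
-- stated objective: alternative
-- what changed: Perimeter is computed by the shared-edge identity 4*n - 2*pairs, counting only the two forward neighbours of each cell in a set, instead of testing all four sides of every cell against the list; the per-letter dict is replaced by a running total.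
-- outside the precondition, e.g. on calculate_areas({'A': [[(0, 0), (0, 0), (1, 0)]]}): A returns 27, B returns 24
import Mathlib
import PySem

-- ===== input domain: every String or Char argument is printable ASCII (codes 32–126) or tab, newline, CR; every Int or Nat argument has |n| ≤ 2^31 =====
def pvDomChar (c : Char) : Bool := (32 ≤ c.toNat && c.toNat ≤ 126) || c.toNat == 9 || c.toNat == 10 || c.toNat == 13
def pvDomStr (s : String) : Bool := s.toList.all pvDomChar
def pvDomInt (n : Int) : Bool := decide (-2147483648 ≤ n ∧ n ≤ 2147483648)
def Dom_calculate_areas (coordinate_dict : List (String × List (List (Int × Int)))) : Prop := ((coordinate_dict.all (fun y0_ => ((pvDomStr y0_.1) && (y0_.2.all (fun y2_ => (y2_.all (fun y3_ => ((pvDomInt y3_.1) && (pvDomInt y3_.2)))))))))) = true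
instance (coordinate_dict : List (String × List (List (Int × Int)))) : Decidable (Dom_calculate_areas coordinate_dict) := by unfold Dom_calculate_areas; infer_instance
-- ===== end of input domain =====

-- B computes each group's perimeter by the shared-edge identity 4*n - 2*pairs over a set of the
-- cells instead of testing all four sides of every cell against the list, and keeps a running
-- total instead of a per-letter dict (objective: alternative).


-- ===== PORT A =====
-- calculate_perimeter: checks the four sides of every cell against the list
def pvCalcPerimeter (area : List (Int × Int)) : Int :=
  area.foldl (fun per c =>
    let per := if (c.1 - 1, c.2) ∉ area then per + 1 else per
    let per := if (c.1 + 1, c.2) ∉ area then per + 1 else per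
    let per := if (c.1, c.2 - 1) ∉ area then per + 1 else per
    if (c.1, c.2 + 1) ∉ area then per + 1 else per) 0

def calculate_areas (coordinate_dict : List (String × List (List (Int × Int)))) : Int :=
  (coordinate_dict.foldl (fun areas lg =>
      areas.insert lg.1
        (lg.2.foldl (fun acc group => acc + PySem.List.len group * pvCalcPerimeter group) 0))
    (PySem.Dict.empty : PySem.Dict String Int)).values.sum

-- ===== PORT B =====
-- n * (4*n - 2*pairs) where pairs counts the two forward neighbours of each cell in the cell set
def pvGroupPrice (group : List (Int × Int)) : Int :=
  let cells : PySem.Set (Int × Int) := PySem.Set.ofList group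
  let n : Int := PySem.List.len group
  let pairs : Int :=
    (group.map (fun c =>
      (if (c.1 + 1, c.2) ∈ cells then (1 : Int) else 0) +
      (if (c.1, c.2 + 1) ∈ cells then (1 : Int) else 0))).sum
  n * (4 * n - 2 * pairs)

def calculate_areas_alt (coordinate_dict : List (String × List (List (Int × Int)))) : Int :=
  coordinate_dict.foldl (fun total lg =>
    total + lg.2.foldl (fun t group => t + pvGroupPrice group) 0) 0

-- ===== PRECONDITION & SPEC =====
-- Pre_ excludes association lists with a repeated letter key (a Python dict cannot carry them; A's
-- dict overwrite would drop earlier entries) and groups with duplicate coordinates, a corner flood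
-- fill never produces, on which A's per-occurrence list counting and B's set arithmetic are both
-- defensible but differ.
def Pre_calculate_areas (coordinate_dict : List (String × List (List (Int × Int)))) : Prop :=
  (coordinate_dict.map Prod.fst).Nodup ∧
  ∀ p ∈ coordinate_dict, ∀ g ∈ p.2, g.Nodup
instance (coordinate_dict : List (String × List (List (Int × Int)))) : Decidable (Pre_calculate_areas coordinate_dict) := by unfold Pre_calculate_areas; infer_instance

def pvWitness_calculate_areas : (List (String × List (List (Int × Int)))) :=
  [("A", [[(0, 0), (1, 0)], [(5, 5)]]), ("B", [[(2, 2), (2, 3), (3, 2)]])]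

def Spec_calculate_areas (coordinate_dict : List (String × List (List (Int × Int)))) (out : Int) : Prop := out = calculate_areas_alt coordinate_dict
instance (coordinate_dict : List (String × List (List (Int × Int)))) (out : Int) : Decidable (Spec_calculate_areas coordinate_dict out) := by unfold Spec_calculate_areas; infer_instance

-- ===== CLAIM (what is proved, stated in full; the proofs are below) =====
def Claim_equal_calculate_areas : Prop := ∀ (coordinate_dict : List (String × List (List (Int × Int)))), Dom_calculate_areas coordinate_dict → Pre_calculate_areas coordinate_dict → Spec_calculate_areas coordinate_dict (calculate_areas coordinate_dict)

-- ===== LEMMAS AND PROOFS =====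

-- the shift c ↦ c + e matches forward and backward neighbour counts on a duplicate-free list
theorem pv_shift_count (l : List (Int × Int)) (hl : l.Nodup) (e : Int × Int) :
    l.countP (fun c => decide (c + e ∈ l)) = l.countP (fun c => decide (c - e ∈ l)) := by
  have key : ∀ p : (Int × Int) → Bool, l.countP p = (l.toFinset.filter (fun c => p c = true)).card := by
    intro p
    rw [List.countP_eq_length_filter, ← List.toFinset_card_of_nodup (hl.filter p), List.toFinset_filter]
  rw [key, key]
  apply Finset.card_bij' (i := fun c _ => c + e) (j := fun d _ => d - e)
  · intro c hc
    simp only [Finset.mem_filter, List.mem_toFinset, decide_eq_true_eq] at hc ⊢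
    exact ⟨hc.2, by simpa using hc.1⟩
  · intro d hd
    simp only [Finset.mem_filter, List.mem_toFinset, decide_eq_true_eq] at hd ⊢
    exact ⟨hd.2, by simpa using hd.1⟩
  · intro c _; abel
  · intro d _; abel

-- componentwise form of pv_shift_count, as Int-valued indicator sums
theorem pv_sym_sum (g : List (Int × Int)) (hg : g.Nodup) (a b : Int) :
    (g.map (fun c => if (c.1 + a, c.2 + b) ∈ g then (1 : Int) else 0)).sum =
      (g.map (fun c => if (c.1 - a, c.2 - b) ∈ g then (1 : Int) else 0)).sum := by
  have h1 := PySem.List.sum_map_ite_one_zero (fun c : Int × Int => decide ((c.1 + a, c.2 + b) ∈ g)) g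
  have h2 := PySem.List.sum_map_ite_one_zero (fun c : Int × Int => decide ((c.1 - a, c.2 - b) ∈ g)) g
  simp only [decide_eq_true_eq] at h1 h2
  rw [h1, h2]
  exact_mod_cast congrArg Nat.cast (pv_shift_count g hg (a, b))

-- splitting the per-cell sum of A's four indicator tests (shape specific to pvCalcPerimeter)
theorem pv_sum_split (l : List (Int × Int)) (f1 f2 f3 f4 : (Int × Int) → Int) :
    (l.map (fun c => 4 - (f1 c + f2 c + f3 c + f4 c))).sum =
      4 * (l.length : Int) -
        ((l.map f1).sum + (l.map f2).sum + (l.map f3).sum + (l.map f4).sum) := by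
  induction l with
  | nil => simp
  | cons x xs ih =>
    simp only [List.map_cons, List.sum_cons, ih, List.length_cons]
    push_cast
    ring

-- A's perimeter loop as a sum of per-cell indicator terms (shape specific to pvCalcPerimeter)
theorem pv_perim_foldl (g l : List (Int × Int)) (init : Int) :
    l.foldl (fun per c =>
      let per := if (c.1 - 1, c.2) ∉ g then per + 1 else per
      let per := if (c.1 + 1, c.2) ∉ g then per + 1 else per
      let per := if (c.1, c.2 - 1) ∉ g then per + 1 else per
      if (c.1, c.2 + 1) ∉ g then per + 1 else per) init =
    init + (l.map (fun c => 4 -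
      ((if (c.1 - 1, c.2) ∈ g then (1 : Int) else 0) +
       (if (c.1 + 1, c.2) ∈ g then (1 : Int) else 0) +
       (if (c.1, c.2 - 1) ∈ g then (1 : Int) else 0) +
       (if (c.1, c.2 + 1) ∈ g then (1 : Int) else 0)))).sum := by
  induction l generalizing init with
  | nil => simp
  | cons x xs ih =>
    rw [List.foldl_cons, ih]
    simp only [List.map_cons, List.sum_cons]
    split_ifs <;> ring

theorem pv_perim_eq (g : List (Int × Int)) (hg : g.Nodup) :
    PySem.List.len g * pvCalcPerimeter g = pvGroupPrice g := by
  have hx := pv_sym_sum g hg 1 0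
  have hy := pv_sym_sum g hg 0 1
  simp only [add_zero, sub_zero] at hx hy
  unfold pvGroupPrice
  simp only [PySem.Set.mem_ofList, PySem.List.len_eq]
  unfold pvCalcPerimeter
  rw [pv_perim_foldl, zero_add, pv_sum_split, PySem.List.sum_map_add_int, ← hx, ← hy]
  ring

-- folding A's dict inserts over distinct keys lists the items in input order
theorem pv_items_build (cd : List (String × List (List (Int × Int))))
    (f : String × List (List (Int × Int)) → Int) (h : (cd.map Prod.fst).Nodup) :
    (cd.foldl (fun d lg => d.insert lg.1 (f lg)) PySem.Dict.empty).items =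
      cd.map (fun lg => (lg.1, f lg)) := by
  induction cd using List.reverseRecOn with
  | nil => rfl
  | append_singleton xs x ih =>
    rw [List.map_append, List.map_singleton, List.nodup_append] at h
    have hd := ih h.1
    have hnotmem : x.1 ∉ xs.map Prod.fst :=
      fun hm => h.2.2 x.1 hm x.1 (List.mem_singleton_self x.1) rfl
    have hcont : (xs.foldl (fun d lg => d.insert lg.1 (f lg)) PySem.Dict.empty).contains x.1 = false := by
      rw [Bool.eq_false_iff]
      intro hc
      have hk : x.1 ∈ (xs.foldl (fun d lg => d.insert lg.1 (f lg)) PySem.Dict.empty).items.map Prod.fst :=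
        (PySem.Dict.contains_iff_mem_keys _ _).mp hc
      rw [hd, List.map_map] at hk
      exact hnotmem (by simpa [Function.comp] using hk)
    rw [List.foldl_append, List.foldl_cons, List.foldl_nil,
      PySem.Dict.items_insert_of_not_contains _ _ hcont, hd, List.map_append, List.map_singleton]

-- ===== VERDICT (by name: the statement is the Claim_ definition above) =====
theorem calculate_areas_spec : Claim_equal_calculate_areas := by
  intro cd _ hpre
  unfold Spec_calculate_areas calculate_areas calculate_areas_alt
  rw [PySem.List.foldl_add, zero_add]
  rw [show ∀ d : PySem.Dict String Int, d.values = d.items.map Prod.snd from fun _ => rfl]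
  rw [pv_items_build cd _ hpre.1, List.map_map]
  congr 1
  apply List.map_congr_left
  intro lg hlg
  simp only [Function.comp]
  rw [PySem.List.foldl_add, PySem.List.foldl_add, zero_add, zero_add]
  congr 1
  apply List.map_congr_left
  intro gp hgp
  exact pv_perim_eq gp (hpre.2 lg hlg gp hgp)
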